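-- pv_equiv track=rewrite | github.com/Luyzz22/Compliance-Hub | app/services/cross_regulation_coverage.py | best_coverage_levels_for_requirement
-- ===== SOURCE A (Python) =====
-- from typing import Literal
--
-- ReqStatus = Literal["gap", "partial", "full", "planned_only"]
--
-- def best_coverage_levels_for_requirement(link_levels: list[str]) -> ReqStatus:
--     """
--     Aggregiert mehrere Links zu einem Requirement zu einem UI-Status.
--
--     „Covered“ für Kennzahlen: mindestens full oder partial.
--     """
--     if not link_levels:
--         return "gap"
--     norm = {str(x).strip().lower() for x in link_levels}
--     if "full" in norm:
--         return "full"
--     if "partial" in norm: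
--         return "partial"
--     if "planned" in norm:
--         return "planned_only"
--     return "gap"
-- ===== SOURCE B (Python) =====
-- _PRIORITY = {"full": 3, "partial": 2, "planned": 1}
-- _STATUS = ["gap", "planned_only", "partial", "full"]
--
-- def best_coverage_levels_for_requirement(link_levels: list[str]) -> str:
--     best = 0
--     for x in link_levels:
--         best = max(best, _PRIORITY.get(str(x).strip().lower(), 0))
--     return _STATUS[best]
-- ===== Notes on version B (the rewrite author's own statement) =====
-- stated objective: simpler
-- what changed: Replaces the set construction plus three membership tests with a single fold keeping the running maximum of a priority rank, then maps the final rank back to the status name.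
import Mathlib
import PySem

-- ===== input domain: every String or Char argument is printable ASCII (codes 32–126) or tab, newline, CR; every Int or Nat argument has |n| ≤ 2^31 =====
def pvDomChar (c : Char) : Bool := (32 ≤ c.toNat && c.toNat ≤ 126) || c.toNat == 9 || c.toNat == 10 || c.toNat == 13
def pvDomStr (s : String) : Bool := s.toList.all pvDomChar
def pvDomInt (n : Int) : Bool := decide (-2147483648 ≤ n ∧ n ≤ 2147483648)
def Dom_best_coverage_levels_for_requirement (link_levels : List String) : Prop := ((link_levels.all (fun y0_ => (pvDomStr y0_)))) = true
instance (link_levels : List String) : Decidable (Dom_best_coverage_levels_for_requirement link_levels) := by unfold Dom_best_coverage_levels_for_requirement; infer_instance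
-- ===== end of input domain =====

-- B replaces A's normalized set plus three membership tests with one fold keeping a running maximum priority rank (objective: simpler).

-- ===== PORT A =====
-- str(x).strip().lower() for a string x
def pvNorm (x : String) : String := PySem.Str.lower (PySem.Str.strip x)

def best_coverage_levels_for_requirement (link_levels : List String) : String :=
  if link_levels = [] then "gap"
  else
    let norm : PySem.Set String := PySem.Set.ofList (link_levels.map pvNorm)
    if PySem.Set.contains norm "full" then "full"
    else if PySem.Set.contains norm "partial" then "partial"
    else if PySem.Set.contains norm "planned" then "planned_only"
    else "gap"

-- ===== PORT B =====
-- _PRIORITY.get(s, 0), the dict literal ported as its lookup function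
def pvRank (s : String) : Nat :=
  if s = "full" then 3 else if s = "partial" then 2 else if s = "planned" then 1 else 0

def pvStatus : List String := ["gap", "planned_only", "partial", "full"]

def best_coverage_levels_for_requirement_alt (link_levels : List String) : String :=
  let best := link_levels.foldl (fun acc x => max acc (pvRank (pvNorm x))) 0
  pvStatus.getD best "gap"

-- ===== PRECONDITION & SPEC =====
def Spec_best_coverage_levels_for_requirement (link_levels : List String) (out : String) : Prop := out = best_coverage_levels_for_requirement_alt link_levels
instance (link_levels : List String) (out : String) : Decidable (Spec_best_coverage_levels_for_requirement link_levels out) := by unfold Spec_best_coverage_levels_for_requirement; infer_instance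

-- ===== CLAIM (what is proved, stated in full; the proofs are below) =====
def Claim_equal_best_coverage_levels_for_requirement : Prop := ∀ (link_levels : List String), Dom_best_coverage_levels_for_requirement link_levels → Spec_best_coverage_levels_for_requirement link_levels (best_coverage_levels_for_requirement link_levels)

-- ===== LEMMAS AND PROOFS =====

def pvMaxR (l : List String) : Nat := l.foldl (fun acc x => max acc (pvRank (pvNorm x))) 0

theorem pvMaxR_foldl (l : List String) (a : Nat) :
    l.foldl (fun acc x => max acc (pvRank (pvNorm x))) a = max a (pvMaxR l) := by
  induction l generalizing a with
  | nil => simp [pvMaxR]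
  | cons x l ih =>
      simp only [pvMaxR, List.foldl_cons] at *
      rw [ih, ih (max 0 _)]
      omega

theorem pvMaxR_cons (x : String) (l : List String) :
    pvMaxR (x :: l) = max (pvRank (pvNorm x)) (pvMaxR l) := by
  conv_lhs => rw [pvMaxR, List.foldl_cons]
  rw [pvMaxR_foldl]
  omega

theorem pvRank_le (s : String) : pvRank s ≤ 3 := by
  unfold pvRank; split_ifs <;> omega

theorem pvMaxR_le (l : List String) : pvMaxR l ≤ 3 := by
  induction l with
  | nil => simp [pvMaxR]
  | cons x l ih =>
      rw [pvMaxR_cons]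
      have := pvRank_le (pvNorm x)
      omega

theorem pvMaxR_ge (l : List String) (k : Nat) (hk : 0 < k) :
    k ≤ pvMaxR l ↔ ∃ x ∈ l, k ≤ pvRank (pvNorm x) := by
  induction l with
  | nil =>
      simp only [pvMaxR, List.foldl_nil, List.not_mem_nil]
      constructor
      · intro h; omega
      · rintro ⟨x, hx, -⟩; exact absurd hx (by simp)
  | cons x l ih =>
      rw [pvMaxR_cons, le_max_iff]
      simp only [List.mem_cons]
      constructor
      · rintro (h | h)
        · exact ⟨x, Or.inl rfl, h⟩
        · obtain ⟨y, hy, hr⟩ := ih.mp h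
          exact ⟨y, Or.inr hy, hr⟩
      · rintro ⟨y, hy | hy, hr⟩
        · exact Or.inl (hy ▸ hr)
        · exact Or.inr (ih.mpr ⟨y, hy, hr⟩)

theorem pvRank_ge3 (s : String) : 3 ≤ pvRank s ↔ s = "full" := by
  unfold pvRank; split_ifs with h1 h2 h3 <;> simp_all

theorem pvRank_ge2 (s : String) : 2 ≤ pvRank s ↔ s = "full" ∨ s = "partial" := by
  unfold pvRank; split_ifs with h1 h2 h3 <;> simp_all

theorem pvRank_ge1 (s : String) : 1 ≤ pvRank s ↔ s = "full" ∨ s = "partial" ∨ s = "planned" := by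
  unfold pvRank; split_ifs with h1 h2 h3 <;> simp_all

theorem pv_contains_iff (xs : List String) (s : String) :
    PySem.Set.contains (PySem.Set.ofList xs) s = true ↔ s ∈ xs := by
  simp [PySem.Set.contains, PySem.Set.mem_ofList]

-- ===== VERDICT (by name: the statement is the Claim_ definition above) =====
theorem best_coverage_levels_for_requirement_spec : Claim_equal_best_coverage_levels_for_requirement := by
  intro l _
  show best_coverage_levels_for_requirement l = best_coverage_levels_for_requirement_alt l
  unfold best_coverage_levels_for_requirement best_coverage_levels_for_requirement_alt
  rw [show l.foldl (fun acc x => max acc (pvRank (pvNorm x))) 0 = pvMaxR l from rfl]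
  have hle := pvMaxR_le l
  have h3 : (∃ x ∈ l, pvNorm x = "full") ↔ 3 ≤ pvMaxR l := by
    rw [pvMaxR_ge l 3 (by omega)]
    exact exists_congr fun x => and_congr_right fun _ => (pvRank_ge3 _).symm
  have h2 : (∃ x ∈ l, pvNorm x = "full" ∨ pvNorm x = "partial") ↔ 2 ≤ pvMaxR l := by
    rw [pvMaxR_ge l 2 (by omega)]
    exact exists_congr fun x => and_congr_right fun _ => (pvRank_ge2 _).symm
  have h1 : (∃ x ∈ l, pvNorm x = "full" ∨ pvNorm x = "partial" ∨ pvNorm x = "planned") ↔ 1 ≤ pvMaxR l := by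
    rw [pvMaxR_ge l 1 (by omega)]
    exact exists_congr fun x => and_congr_right fun _ => (pvRank_ge1 _).symm
  by_cases h0 : l = []
  · subst h0
    simp [pvMaxR, pvStatus]
  · rw [if_neg h0]
    by_cases hF : ∃ x ∈ l, pvNorm x = "full"
    · have hm : pvMaxR l = 3 := by have := h3.mp hF; omega
      rw [hm]
      rw [if_pos (by rw [pv_contains_iff, List.mem_map]; obtain ⟨x, hx, he⟩ := hF; exact ⟨x, hx, he⟩)]
      rfl
    · have hc : ¬ (PySem.Set.contains (PySem.Set.ofList (l.map pvNorm)) "full" = true) := by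
        rw [pv_contains_iff, List.mem_map]
        rintro ⟨x, hx, he⟩; exact hF ⟨x, hx, he⟩
      rw [if_neg hc]
      by_cases hP : ∃ x ∈ l, pvNorm x = "partial"
      · have hm : pvMaxR l = 2 := by
          have hge := h2.mp (by obtain ⟨x, hx, he⟩ := hP; exact ⟨x, hx, Or.inr he⟩)
          have hlt : ¬ 3 ≤ pvMaxR l := fun h => hF (h3.mpr h)
          omega
        rw [hm]
        rw [if_pos (by rw [pv_contains_iff, List.mem_map]; obtain ⟨x, hx, he⟩ := hP; exact ⟨x, hx, he⟩)]
        rfl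
      · have hc2 : ¬ (PySem.Set.contains (PySem.Set.ofList (l.map pvNorm)) "partial" = true) := by
          rw [pv_contains_iff, List.mem_map]
          rintro ⟨x, hx, he⟩; exact hP ⟨x, hx, he⟩
        rw [if_neg hc2]
        by_cases hQ : ∃ x ∈ l, pvNorm x = "planned"
        · have hm : pvMaxR l = 1 := by
            have hge := h1.mp (by obtain ⟨x, hx, he⟩ := hQ; exact ⟨x, hx, Or.inr (Or.inr he)⟩)
            have hlt : ¬ 2 ≤ pvMaxR l := fun h => by
              rcases h2.mpr h with ⟨x, hx, he | he⟩
              · exact hF ⟨x, hx, he⟩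
              · exact hP ⟨x, hx, he⟩
            omega
          rw [hm]
          rw [if_pos (by rw [pv_contains_iff, List.mem_map]; obtain ⟨x, hx, he⟩ := hQ; exact ⟨x, hx, he⟩)]
          rfl
        · have hc3 : ¬ (PySem.Set.contains (PySem.Set.ofList (l.map pvNorm)) "planned" = true) := by
            rw [pv_contains_iff, List.mem_map]
            rintro ⟨x, hx, he⟩; exact hQ ⟨x, hx, he⟩
          rw [if_neg hc3]
          have hm : pvMaxR l = 0 := by
            have hlt : ¬ 1 ≤ pvMaxR l := fun h => by
              rcases h1.mpr h with ⟨x, hx, he | he | he⟩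
              · exact hF ⟨x, hx, he⟩
              · exact hP ⟨x, hx, he⟩
              · exact hQ ⟨x, hx, he⟩
            omega
          rw [hm]
          rfl
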